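-- pv_equiv track=rewrite | github.com/dashingDragon/mp-tp | bitmap_exo.py | valeur_inv
-- ===== SOURCE A (Python) =====
-- def valeur_inv(dec):
--     """Traduit un nombre décimal en 4 octets en base 256"""
--     l_octets = [0, 0, 0, 0]
--     p = 3
--     while p >= 0:
--         l_octets[p] += dec // (256**p)
--         dec %= (256**p)
--         p -= 1
--     return l_octets
-- ===== SOURCE B (Python) =====
-- def valeur_inv(dec):
--     """Traduit un nombre décimal en 4 octets en base 256"""
--     return [dec % 256,
--             (dec // 256) % 256,
--             (dec // 256**2) % 256,
--             dec // 256**3]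
-- ===== Notes on version B (the rewrite author's own statement) =====
-- stated objective: simpler
-- what changed: Replaces the top-down while loop that mutates a running remainder and an index into four independent closed-form div/mod expressions on the original input (top slot left unmasked, as in A).
import Mathlib
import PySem

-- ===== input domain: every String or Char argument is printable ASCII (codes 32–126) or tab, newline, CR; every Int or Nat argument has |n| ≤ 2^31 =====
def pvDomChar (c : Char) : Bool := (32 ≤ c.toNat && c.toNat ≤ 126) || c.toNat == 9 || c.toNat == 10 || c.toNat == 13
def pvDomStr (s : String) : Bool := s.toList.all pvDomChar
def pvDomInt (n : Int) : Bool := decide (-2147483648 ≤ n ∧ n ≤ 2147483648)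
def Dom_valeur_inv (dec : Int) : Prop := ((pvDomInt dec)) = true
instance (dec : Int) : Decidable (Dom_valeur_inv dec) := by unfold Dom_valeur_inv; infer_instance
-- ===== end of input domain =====

-- B replaces A's mutating running-remainder loop with four independent closed-form div/mod expressions (simpler).

-- ===== PORT A =====
-- while p >= 0: l_octets[p] += dec // 256**p; dec %= 256**p; p -= 1  — fuel = p+1
def valeurInvLoop : Nat → Int → List Int → List Int
  | 0, _, l => l
  | n + 1, dec, l =>
    let l' := l.set n (l.getD n 0 + PySem.Int.floordiv dec ((256 : Int) ^ n))
    valeurInvLoop n (PySem.Int.mod dec ((256 : Int) ^ n)) l'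

def valeur_inv (dec : Int) : List Int :=
  valeurInvLoop 4 dec [0, 0, 0, 0]

-- ===== PORT B =====
def valeur_inv_alt (dec : Int) : List Int :=
  [PySem.Int.mod dec 256,
   PySem.Int.mod (PySem.Int.floordiv dec 256) 256,
   PySem.Int.mod (PySem.Int.floordiv dec (256 ^ 2)) 256,
   PySem.Int.floordiv dec (256 ^ 3)]

-- ===== PRECONDITION & SPEC =====
def Spec_valeur_inv (dec : Int) (out : List Int) : Prop := out = valeur_inv_alt dec
instance (dec : Int) (out : List Int) : Decidable (Spec_valeur_inv dec out) := by unfold Spec_valeur_inv; infer_instance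

-- ===== CLAIM (what is proved, stated in full; the proofs are below) =====
def Claim_equal_valeur_inv : Prop := ∀ (dec : Int), Dom_valeur_inv dec → Spec_valeur_inv dec (valeur_inv dec)

-- ===== LEMMAS AND PROOFS =====

-- ===== VERDICT (by name: the statement is the Claim_ definition above) =====
theorem valeur_inv_spec : Claim_equal_valeur_inv := by
  intro dec _
  have F : ∀ (a b : Int), 0 < b → PySem.Int.floordiv a b = a / b :=
    fun a b h => PySem.Int.floordiv_eq_ediv_of_pos h
  have M : ∀ (a b : Int), 0 < b → PySem.Int.mod a b = a % b :=
    fun a b h => PySem.Int.mod_eq_emod_of_pos h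
  unfold Spec_valeur_inv valeur_inv valeur_inv_alt
  simp only [valeurInvLoop, List.set, List.getD, List.getElem?_cons_succ, List.getElem?_cons_zero,
    F _ _ (by norm_num : (0:Int) < 256 ^ 0), F _ _ (by norm_num : (0:Int) < 256 ^ 1),
    F _ _ (by norm_num : (0:Int) < 256 ^ 2), F _ _ (by norm_num : (0:Int) < 256 ^ 3),
    F _ _ (by norm_num : (0:Int) < 256),
    M _ _ (by norm_num : (0:Int) < 256 ^ 1),
    M _ _ (by norm_num : (0:Int) < 256 ^ 2), M _ _ (by norm_num : (0:Int) < 256 ^ 3),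
    M _ _ (by norm_num : (0:Int) < 256), Option.getD_some]
  norm_num
  omega
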